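-- pv_equiv track=rewrite | github.com/Acegenesis/Fastlit | fastlit/ui/dataframe.py | _normalize_column_order
-- ===== SOURCE A (Python) =====
-- from typing import Any, Callable
--
-- def _normalize_column_order(
--     columns: list[dict[str, Any]],
--     column_order: list[str] | None,
-- ) -> list[str] | None:
--     """Return a normalized display order without dropping unspecified columns."""
--     if not column_order:
--         return None
--
--     available = [str(col.get("name", "")) for col in columns]
--     seen: set[str] = set()
--     ordered: list[str] = []
--     for name in column_order:
--         if name in available and name not in seen:
--             ordered.append(name)
--             seen.add(name)
--
--     for name in available:
--         if name not in seen: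
--             ordered.append(name)
--
--     return ordered or None
-- ===== SOURCE B (Python) =====
-- def _normalize_column_order(columns, column_order):
--     """Return a normalized display order without dropping unspecified columns."""
--     if not column_order:
--         return None
--     priority = {n: i for i, n in enumerate(dict.fromkeys(column_order))}
--     available = [str(col.get("name", "")) for col in columns]
--     head = sorted({n for n in available if n in priority}, key=priority.get)
--     tail = [n for n in available if n not in priority]
--     return (head + tail) or None
-- ===== Notes on version B (the rewrite author's own statement) =====
-- stated objective: faster
-- what changed: Replaces A's seen-set traversal of column_order with a rank-table sort: build a priority dict from the deduplicated column_order once, then obtain the head by sorting the set of mentioned available names by their rank and append the unmentioned names, so the output order comes from a sort by precomputed ranks instead of from walking column_order with a mutating seen set.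
import Mathlib
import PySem

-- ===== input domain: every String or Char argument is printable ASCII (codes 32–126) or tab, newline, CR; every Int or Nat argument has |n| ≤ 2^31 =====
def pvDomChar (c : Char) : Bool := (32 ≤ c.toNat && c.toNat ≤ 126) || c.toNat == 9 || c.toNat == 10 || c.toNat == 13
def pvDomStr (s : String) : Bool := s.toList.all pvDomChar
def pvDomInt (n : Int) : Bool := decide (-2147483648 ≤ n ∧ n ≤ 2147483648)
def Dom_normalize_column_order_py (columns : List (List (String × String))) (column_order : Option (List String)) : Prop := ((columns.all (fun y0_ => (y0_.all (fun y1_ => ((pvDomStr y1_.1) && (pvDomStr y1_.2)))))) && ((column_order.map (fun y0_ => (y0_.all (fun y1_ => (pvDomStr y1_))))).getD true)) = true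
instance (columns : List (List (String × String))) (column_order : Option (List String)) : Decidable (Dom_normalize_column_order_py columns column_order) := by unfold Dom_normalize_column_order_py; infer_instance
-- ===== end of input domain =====

-- B derives the head order from a stable sort by a precomputed rank table instead of
-- A's seen-set walk over column_order; same return value everywhere (alternative algorithm).

-- ===== PORT A =====
def normalize_column_order_py (columns : List (List (String × String))) (column_order : Option (List String)) : Option (List String) :=
  match column_order with
  | none => none
  | some co =>
    if co = [] then none  -- 'if not column_order'
    else
      let available := columns.map (fun col => PySem.Dict.getD ⟨col⟩ "name" "")
      let st := co.foldl (fun (st : PySem.Set String × List String) name =>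
          if available.contains name && !(PySem.Set.contains st.1 name) then
            (PySem.Set.add st.1 name, st.2 ++ [name])
          else st) (PySem.Set.empty, [])
      let ordered := available.foldl (fun acc name =>
          if !(PySem.Set.contains st.1 name) then acc ++ [name] else acc) st.2
      if ordered = [] then none else some ordered  -- 'return ordered or None'

-- ===== PORT B =====
-- 'priority = {n: i for i, n in enumerate(dict.fromkeys(column_order))}' is the foldl of
-- insert over enumerate(dedup co); 'key=priority.get' is ported as getD _ 0: every element
-- of the sorted set is a key of priority, so the default is never consulted.
def normalize_column_order_py_alt (columns : List (List (String × String))) (column_order : Option (List String)) : Option (List String) :=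
  match column_order with
  | none => none
  | some co =>
    if co = [] then none
    else
      let priority : PySem.Dict String Int :=
        (PySem.List.enumerate (PySem.List.dedup co) 0).foldl
          (fun d p => PySem.Dict.insert d p.2 p.1) PySem.Dict.empty
      let available := columns.map (fun col => PySem.Dict.getD ⟨col⟩ "name" "")
      let head := PySem.List.sorted
          (PySem.Set.ofList (available.filter (fun n => PySem.Dict.contains priority n)))
          (fun n => PySem.Dict.getD priority n 0) false
      let tail := available.filter (fun n => !(PySem.Dict.contains priority n))
      let res := head ++ tail
      if res = [] then none else some res

-- ===== PRECONDITION & SPEC =====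
def Spec_normalize_column_order_py (columns : List (List (String × String))) (column_order : Option (List String)) (out : Option (List String)) : Prop := out = normalize_column_order_py_alt columns column_order
instance (columns : List (List (String × String))) (column_order : Option (List String)) (out : Option (List String)) : Decidable (Spec_normalize_column_order_py columns column_order out) := by unfold Spec_normalize_column_order_py; infer_instance

-- ===== CLAIM =====
def Claim_equal_normalize_column_order_py : Prop := ∀ (columns : List (List (String × String))) (column_order : Option (List String)), Dom_normalize_column_order_py columns column_order → Spec_normalize_column_order_py columns column_order (normalize_column_order_py columns column_order)

-- ===== LEMMAS AND PROOFS =====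

-- names of A's first loop: picked (in order) from co, given the seen-set s
def pickA (av : List String) (s : PySem.Set String) : List String → List String
  | [] => []
  | n :: rest =>
    if av.contains n && !(PySem.Set.contains s n) then
      n :: pickA av (PySem.Set.add s n) rest
    else pickA av s rest

-- dedup relative to an already-seen set t
def dd (t : PySem.Set String) : List String → List String
  | [] => []
  | n :: rest => if PySem.Set.contains t n then dd t rest else n :: dd (PySem.Set.add t n) rest

lemma contains_append_singleton (s : PySem.Set String) (n x : String) :
    PySem.Set.contains (s ++ [n]) x = (PySem.Set.contains s x || x == n) := by
  rw [Bool.eq_iff_iff]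
  simp

lemma add_of_not_contains (s : PySem.Set String) (n : String)
    (h : PySem.Set.contains s n = false) : PySem.Set.add s n = s ++ [n] := by
  unfold PySem.Set.add
  rw [h]
  rfl

lemma set_update_eq_append_dd (co : List String) : ∀ t : PySem.Set String,
    PySem.Set.update t co = t ++ dd t co := by
  induction co with
  | nil => intro t; simp [PySem.Set.update, dd]
  | cons n rest ih =>
    intro t
    by_cases h : PySem.Set.contains t n = true
    · have hadd : PySem.Set.add t n = t := by unfold PySem.Set.add; rw [h]; rfl
      calc PySem.Set.update t (n :: rest) = PySem.Set.update (PySem.Set.add t n) rest := rfl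
        _ = PySem.Set.update t rest := by rw [hadd]
        _ = t ++ dd t rest := ih t
        _ = t ++ dd t (n :: rest) := by rw [dd, if_pos h]
    · have h' : PySem.Set.contains t n = false := by rwa [Bool.not_eq_true] at h
      calc PySem.Set.update t (n :: rest) = PySem.Set.update (PySem.Set.add t n) rest := rfl
        _ = PySem.Set.update (t ++ [n]) rest := by rw [add_of_not_contains t n h']
        _ = (t ++ [n]) ++ dd (t ++ [n]) rest := ih (t ++ [n])
        _ = t ++ (n :: dd (t ++ [n]) rest) := by rw [List.append_assoc]; rfl
        _ = t ++ dd t (n :: rest) := by rw [dd, if_neg h, add_of_not_contains t n h']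

lemma loopA (av : List String) (co : List String) : ∀ (s : PySem.Set String) (acc : List String),
    co.foldl (fun (st : PySem.Set String × List String) name =>
        if av.contains name && !(PySem.Set.contains st.1 name) then
          (PySem.Set.add st.1 name, st.2 ++ [name])
        else st) (s, acc)
      = (PySem.Set.update s (pickA av s co), acc ++ pickA av s co) := by
  induction co with
  | nil => intro s acc; simp [pickA, PySem.Set.update]
  | cons n rest ih =>
    intro s acc
    rw [List.foldl_cons]
    by_cases h : (av.contains n && !(PySem.Set.contains s n)) = true
    · rw [if_pos h, ih (PySem.Set.add s n) (acc ++ [n])]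
      rw [pickA, if_pos h, List.append_assoc]
      rfl
    · rw [if_neg h, ih s acc, pickA, if_neg h]

lemma pickA_eq_filter_dd (av co : List String) : ∀ (s t : PySem.Set String),
    (∀ x, PySem.Set.contains s x = (PySem.Set.contains t x && av.contains x)) →
    pickA av s co = (dd t co).filter (fun n => av.contains n) := by
  induction co with
  | nil => intro s t _; rw [pickA, dd]; rfl
  | cons n rest ih =>
    intro s t hst
    by_cases ht : PySem.Set.contains t n = true
    · rw [dd, if_pos ht]
      by_cases ha : av.contains n = true
      · have hsn : PySem.Set.contains s n = true := by rw [hst n, ht, ha]; rfl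
        rw [pickA, if_neg (by rw [ha, hsn]; decide)]
        exact ih s t hst
      · have ha' : av.contains n = false := by rwa [Bool.not_eq_true] at ha
        rw [pickA, if_neg (by rw [ha', Bool.false_and]; decide)]
        exact ih s t hst
    · have ht' : PySem.Set.contains t n = false := by rwa [Bool.not_eq_true] at ht
      rw [dd, if_neg ht, add_of_not_contains t n ht']
      by_cases ha : av.contains n = true
      · have hsn : PySem.Set.contains s n = false := by rw [hst n, ht', Bool.false_and]
        rw [pickA, if_pos (by rw [ha, hsn]; rfl), add_of_not_contains s n hsn,
          List.filter_cons_of_pos ha]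
        congr 1
        apply ih
        intro x
        rw [contains_append_singleton s n x, contains_append_singleton t n x, hst x]
        by_cases hx : x = n
        · subst hx
          rw [BEq.rfl, ha]
          cases PySem.Set.contains t x <;> rfl
        · rw [beq_eq_false_iff_ne.mpr hx]
          cases PySem.Set.contains t x <;> cases av.contains x <;> rfl
      · have ha' : av.contains n = false := by rwa [Bool.not_eq_true] at ha
        rw [pickA, if_neg (by rw [ha', Bool.false_and]; decide),
          List.filter_cons_of_neg (by rw [ha']; decide)]
        apply ih
        intro x
        rw [contains_append_singleton t n x, hst x]
        by_cases hx : x = n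
        · subst hx
          rw [BEq.rfl, ha']
          cases PySem.Set.contains t x <;> rfl
        · rw [beq_eq_false_iff_ne.mpr hx]
          cases PySem.Set.contains t x <;> cases av.contains x <;> rfl

lemma loop2 (seen : PySem.Set String) (l : List String) : ∀ acc : List String,
    l.foldl (fun acc name => if !(PySem.Set.contains seen name) then acc ++ [name] else acc) acc
      = acc ++ l.filter (fun n => !(PySem.Set.contains seen n)) := by
  induction l with
  | nil => intro acc; simp
  | cons n rest ih =>
    intro acc
    rw [List.foldl_cons]
    by_cases h : PySem.Set.contains seen n = true
    · rw [if_neg (by rw [h]; decide), ih acc, List.filter_cons_of_neg (by rw [h]; decide)]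
    · have h' : PySem.Set.contains seen n = false := by rwa [Bool.not_eq_true] at h
      rw [if_pos (by rw [h']; rfl), ih (acc ++ [n]),
        List.filter_cons_of_pos (by rw [h']; rfl), List.append_assoc]
      rfl

-- B's rank table, as items / keys / lookups
lemma priority_items (co : List String) :
    ((PySem.List.enumerate (PySem.List.dedup co) 0).foldl
        (fun d p => PySem.Dict.insert d p.2 p.1) (PySem.Dict.empty : PySem.Dict String Int)).items
      = (PySem.List.enumerate (PySem.List.dedup co) 0).map (fun p => (p.2, p.1)) := by
  rw [PySem.Dict.items_foldl_insert_fresh (PySem.List.enumerate (PySem.List.dedup co) 0)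
      (fun p => p.2) (fun p => p.1) PySem.Dict.empty
      (by intro a _; exact PySem.Dict.contains_empty a.2)
      (by rw [PySem.List.map_snd_enumerate, PySem.List.dedup_eq_ofList]
          exact PySem.Set.nodup_ofList co)]
  rfl

lemma priority_keys (co : List String) :
    ((PySem.List.enumerate (PySem.List.dedup co) 0).foldl
        (fun d p => PySem.Dict.insert d p.2 p.1) (PySem.Dict.empty : PySem.Dict String Int)).keys
      = PySem.List.dedup co := by
  show (((PySem.List.enumerate (PySem.List.dedup co) 0).foldl
      (fun d p => PySem.Dict.insert d p.2 p.1) (PySem.Dict.empty : PySem.Dict String Int)).items).map (·.1)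
    = PySem.List.dedup co
  rw [priority_items, List.map_map]
  exact PySem.List.map_snd_enumerate _ 0

lemma priority_contains (co : List String) (n : String) :
    ((PySem.List.enumerate (PySem.List.dedup co) 0).foldl
        (fun d p => PySem.Dict.insert d p.2 p.1) (PySem.Dict.empty : PySem.Dict String Int)).contains n
      = decide (n ∈ co) := by
  rw [PySem.Dict.contains_eq_decide_mem_keys, priority_keys, PySem.List.dedup_eq_ofList]
  simp [PySem.Set.mem_ofList]

lemma priority_getD (co : List String) (i : Nat) (h : i < (PySem.List.dedup co).length) :
    ((PySem.List.enumerate (PySem.List.dedup co) 0).foldl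
        (fun d p => PySem.Dict.insert d p.2 p.1) (PySem.Dict.empty : PySem.Dict String Int)).getD
        ((PySem.List.dedup co)[i]) 0 = (i : Int) := by
  apply PySem.Dict.getD_of_mem_items
  · rw [priority_items]
    have hm : ((0 + (i : Int), (PySem.List.dedup co)[i]) : Int × String)
        ∈ PySem.List.enumerate (PySem.List.dedup co) 0 :=
      (PySem.List.mem_enumerate_iff _ _ _).mpr ⟨i, h, rfl⟩
    have := List.mem_map_of_mem (f := fun p : Int × String => (p.2, p.1)) hm
    simpa using this
  · rw [priority_keys, PySem.List.dedup_eq_ofList]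
    exact PySem.Set.nodup_ofList co

-- ===== VERDICT =====
theorem normalize_column_order_py_spec : Claim_equal_normalize_column_order_py := by
  intro columns column_order _
  unfold Spec_normalize_column_order_py
  cases column_order with
  | none => rfl
  | some co =>
    by_cases hco : co = []
    · simp [normalize_column_order_py, normalize_column_order_py_alt, hco]
    · simp only [normalize_column_order_py, normalize_column_order_py_alt, if_neg hco]
      set av := columns.map (fun col => PySem.Dict.getD ⟨col⟩ "name" "") with hav
      set priority := (PySem.List.enumerate (PySem.List.dedup co) 0).foldl
          (fun d p => PySem.Dict.insert d p.2 p.1) (PySem.Dict.empty : PySem.Dict String Int) with hpr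
      -- the head of A is the availability-filtered dedup of co
      have hdd : PySem.List.dedup co = dd PySem.Set.empty co := by
        rw [PySem.List.dedup_eq_ofList,
          show PySem.Set.ofList co = PySem.Set.update PySem.Set.empty co from rfl,
          set_update_eq_append_dd co PySem.Set.empty]
        rfl
      have hpick : pickA av PySem.Set.empty co
          = (PySem.List.dedup co).filter (fun n => av.contains n) := by
        rw [pickA_eq_filter_dd av co PySem.Set.empty PySem.Set.empty (by intro x; rfl), hdd]
      set headA := (PySem.List.dedup co).filter (fun n => av.contains n) with hheadA
      have hmemA : ∀ n, n ∈ headA ↔ n ∈ co ∧ n ∈ av := by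
        intro n
        rw [hheadA, List.mem_filter, PySem.List.dedup_eq_ofList, PySem.Set.mem_ofList]
        simp
      -- head equality: B's sort by rank reproduces A's pick order
      have hhead : PySem.List.sorted
          (PySem.Set.ofList (av.filter (fun n => PySem.Dict.contains priority n)))
          (fun n => PySem.Dict.getD priority n 0) false = headA := by
        apply PySem.List.sorted_eq_of_perm_of_pairwise_lt
        · apply (List.perm_ext_iff_of_nodup ?_ ?_).mpr
          · intro n
            rw [hmemA n, PySem.Set.mem_ofList, List.mem_filter, hpr, priority_contains]
            simp [and_comm]
          · exact (List.Nodup.filter _ (by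
              rw [PySem.List.dedup_eq_ofList]; exact PySem.Set.nodup_ofList co))
          · exact PySem.Set.nodup_ofList _
        · rw [hheadA]
          apply List.Pairwise.filter
          apply List.pairwise_iff_getElem.mpr
          intro i j hi hj hij
          rw [hpr, priority_getD co i hi, priority_getD co j hj]
          exact_mod_cast hij
      -- tail equality: membership in the seen set is membership in priority
      have htail : av.filter (fun n => !(PySem.Set.contains (PySem.Set.ofList headA) n))
          = av.filter (fun n => !(PySem.Dict.contains priority n)) := by
        apply List.filter_congr
        intro n hn
        have : PySem.Set.contains (PySem.Set.ofList headA) n = PySem.Dict.contains priority n := by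
          rw [Bool.eq_iff_iff, hpr, priority_contains]
          simp only [decide_eq_true_eq]
          constructor
          · intro h
            have : n ∈ PySem.Set.ofList headA := by
              simpa [PySem.Set.contains] using h
            exact ((hmemA n).mp ((PySem.Set.mem_ofList _ _).mp this)).1
          · intro h
            simp only [PySem.Set.contains]
            simp [PySem.Set.mem_ofList, hmemA n, h, hn]
        rw [this]
      rw [loopA av co PySem.Set.empty []]
      dsimp only
      rw [List.nil_append]
      rw [hpick,
        show PySem.Set.update PySem.Set.empty headA = PySem.Set.ofList headA from rfl,
        loop2, htail, hhead]
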